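-- pv_equiv track=rewrite | github.com/dj-lumiere/problem-solving-boj | 백준/Gold/9527. 1의 개수 세기/1의 개수 세기.py | number_frequency
-- ===== SOURCE A (Python) =====
-- from math import log2
--
-- def number_frequency(end:int):
--     if end == 0:
--         return [0,0]
--     else:
--         num_list = [0 for i in range(0, 1+1)]
--         digit = int(log2(end))+1
--         # 모든 자릿수의 앞에 0을 붙인 형태로 자릿수를 전부 맞추기
--         # 루프를 돌면서 해당하는 자릿수의 갯수를 구하기
--         for i in range(1, digit+1):
--             ith_digit = (end // (2**(i-1))) % 2
--             for j in range(0,1+1):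
--                 if j < (ith_digit):
--                     num_list[j] += ((end // (2**i)) + 1) * (2**(i-1))
--                 elif j == (ith_digit):
--                     num_list[j] += (end // (2**i)) * (2**(i-1)) + end % (2**(i-1)) + 1
--                 else:
--                     num_list[j] += (end // (2**i)) * (2**(i-1))
--         # 추가적으로 붙은 0에 대해서 보정하기
--         for i in range(0, digit):
--             num_list[0] -= 2**i
--         return num_list
-- ===== SOURCE B (Python) =====
-- def number_frequency(end: int):
--     if end == 0:
--         return [0, 0]
--     # count of 1-bits over 0..end, per-bit closed formula
--     ones = 0
--     p = 1
--     while p <= end: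
--         q = 2 * p
--         ones += (end + 1) // q * p + max(0, (end + 1) % q - p)
--         p = q
--     # total number of binary digits written for 1..end (0 contributes nothing)
--     total = 0
--     p = 1
--     j = 0
--     while p <= end:
--         hi = min(end, 2 * p - 1)
--         total += (j + 1) * (hi - p + 1)
--         p = 2 * p
--         j += 1
--     return [total - ones, ones]
-- ===== Notes on version B (the rewrite author's own statement) =====
-- stated objective: alternative
-- what changed: Instead of A's single loop that accumulates 0-counts and 1-counts simultaneously via a three-branch case split on each digit and then corrects for padded leading zeros, B computes the 1-bit count with the standard per-bit closed formula over end+1 and, in an independent second pass, the total number of binary digits of 1..end, deriving the 0-count as total - ones.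
import Mathlib
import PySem

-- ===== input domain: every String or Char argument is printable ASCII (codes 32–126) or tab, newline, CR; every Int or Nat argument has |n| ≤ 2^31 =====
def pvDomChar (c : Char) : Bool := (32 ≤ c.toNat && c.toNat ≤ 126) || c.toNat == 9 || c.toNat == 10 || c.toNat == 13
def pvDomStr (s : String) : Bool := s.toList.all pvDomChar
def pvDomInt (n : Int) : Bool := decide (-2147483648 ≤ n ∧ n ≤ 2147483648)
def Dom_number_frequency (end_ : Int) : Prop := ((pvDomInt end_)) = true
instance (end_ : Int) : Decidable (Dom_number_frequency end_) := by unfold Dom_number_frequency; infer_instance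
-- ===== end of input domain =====

-- B replaces A's simultaneous three-branch per-digit 0/1 accumulation (with leading-zero
-- correction) by a per-bit closed formula for the number of 1-bits and an independent
-- bit-length-sum pass, deriving the 0-count as total_bits - ones. Objective: alternative.

-- ===== PORT A =====
-- one iteration of A's outer loop: the inner 'for j in range(0,1+1)' loop over num_list
def pyAStep (end_ : Int) (l : List Int) (i : Int) : List Int :=
  let ith := PySem.Int.mod (PySem.Int.floordiv end_ ((2:Int) ^ (i - 1).toNat)) 2
  (PySem.List.pyRange 0 2 1).foldl (fun acc j =>
    if j < ith then
      acc.set j.toNat ((acc.getD j.toNat 0) + (PySem.Int.floordiv end_ ((2:Int) ^ i.toNat) + 1) * (2:Int) ^ (i - 1).toNat)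
    else if j = ith then
      acc.set j.toNat ((acc.getD j.toNat 0) + PySem.Int.floordiv end_ ((2:Int) ^ i.toNat) * (2:Int) ^ (i - 1).toNat + PySem.Int.mod end_ ((2:Int) ^ (i - 1).toNat) + 1)
    else
      acc.set j.toNat ((acc.getD j.toNat 0) + PySem.Int.floordiv end_ ((2:Int) ^ i.toNat) * (2:Int) ^ (i - 1).toNat)) l

def number_frequency (end_ : Int) : List Int :=
  if end_ = 0 then [0, 0]
  else
    -- Python's int(log2(end)) + 1; exact as Nat.log 2 for 1 ≤ end ≤ 2^31 (float log2 is exact there)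
    let digit : Int := (Nat.log 2 end_.toNat : Int) + 1
    let l1 := (PySem.List.pyRange 1 (digit + 1) 1).foldl (pyAStep end_) [0, 0]
    (PySem.List.pyRange 0 digit 1).foldl (fun l i => l.set 0 ((l.getD 0 0) - (2:Int) ^ i.toNat)) l1

-- ===== PORT B =====
-- B's first while loop: 1-bits over 0..end by the per-bit closed formula.
-- '1 ≤ p' in the guard is only a termination guard; every call from the entry point has p ≥ 1.
def altOnes (end_ p : Int) : Int :=
  if _h : 1 ≤ p ∧ p ≤ end_ then
    (PySem.Int.floordiv (end_ + 1) (2 * p) * p + max 0 (PySem.Int.mod (end_ + 1) (2 * p) - p))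
      + altOnes end_ (2 * p)
  else 0
termination_by (end_ + 1 - p).toNat
decreasing_by omega

-- B's second while loop: total binary digits written for 1..end.
def altTotal (end_ p j : Int) : Int :=
  if h : 1 ≤ p ∧ p ≤ end_ then
    (j + 1) * (min end_ (2 * p - 1) - p + 1) + altTotal end_ (2 * p) (j + 1)
  else 0
termination_by (end_ + 1 - p).toNat
decreasing_by omega

def number_frequency_alt (end_ : Int) : List Int :=
  if end_ = 0 then [0, 0]
  else
    let ones := altOnes end_ 1
    let total := altTotal end_ 1 0
    [total - ones, ones]

-- ===== PRECONDITION & SPEC =====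
-- A raises ValueError (math.log2 domain error) for end < 0; Pre_ excludes exactly those inputs.
def Pre_number_frequency (end_ : Int) : Prop := 0 ≤ end_
instance (end_ : Int) : Decidable (Pre_number_frequency end_) := by unfold Pre_number_frequency; infer_instance
def pvWitness_number_frequency : Int := 5

def Spec_number_frequency (end_ : Int) (out : List Int) : Prop := out = number_frequency_alt end_
instance (end_ : Int) (out : List Int) : Decidable (Spec_number_frequency end_ out) := by unfold Spec_number_frequency; infer_instance

-- ===== CLAIM =====
def Claim_equal_number_frequency : Prop := ∀ (end_ : Int), Dom_number_frequency end_ → Pre_number_frequency end_ → Spec_number_frequency end_ (number_frequency end_)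

-- ===== LEMMAS AND PROOFS =====

-- A's per-bit 1-count at bit position i (Python loop index i+1)
def pvOA (n : Int) (i : Nat) : Int :=
  if PySem.Int.mod (PySem.Int.floordiv n ((2:Int) ^ i)) 2 = 1 then
    PySem.Int.floordiv n ((2:Int) ^ (i + 1)) * 2 ^ i + PySem.Int.mod n ((2:Int) ^ i) + 1
  else PySem.Int.floordiv n ((2:Int) ^ (i + 1)) * 2 ^ i

-- A's per-bit 0-count (counting the padding leading zeros)
def pvZA (n : Int) (i : Nat) : Int :=
  if PySem.Int.mod (PySem.Int.floordiv n ((2:Int) ^ i)) 2 = 1 then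
    (PySem.Int.floordiv n ((2:Int) ^ (i + 1)) + 1) * 2 ^ i
  else PySem.Int.floordiv n ((2:Int) ^ (i + 1)) * 2 ^ i + PySem.Int.mod n ((2:Int) ^ i) + 1

-- B's per-bit 1-count
def pvG (n : Int) (i : Nat) : Int :=
  PySem.Int.floordiv (n + 1) ((2:Int) ^ (i + 1)) * 2 ^ i + max 0 (PySem.Int.mod (n + 1) ((2:Int) ^ (i + 1)) - 2 ^ i)

theorem pv_step (n z o : Int) (i : Nat) :
    pyAStep n [z, o] ((i : Int) + 1) = [z + pvZA n i, o + pvOA n i] := by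
  have hi1 : ((i:Int) + 1 - 1).toNat = i := by omega
  have hi2 : ((i:Int) + 1).toNat = i + 1 := by omega
  have hr : PySem.List.pyRange 0 2 1 = [0, 1] := by
    rw [PySem.List.pyRange_one_cons (by norm_num), PySem.List.pyRange_one_cons (by norm_num),
      PySem.List.pyRange_one_eq_nil (by norm_num)]; norm_num
  unfold pyAStep
  rw [hr]
  simp [pvZA, pvOA, hi2, List.getD]
  rcases Int.emod_two_eq (n / 2 ^ i) with h | h <;> simp [h] <;> ring_nf

theorem pv_foldA (n : Int) (L : Nat) (z o : Int) :
    (PySem.List.pyRange 1 ((L : Int) + 1) 1).foldl (pyAStep n) [z, o]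
      = [z + ∑ i ∈ Finset.range L, pvZA n i, o + ∑ i ∈ Finset.range L, pvOA n i] := by
  induction L generalizing z o with
  | zero => rw [PySem.List.pyRange_one_eq_nil (by norm_num)]; simp
  | succ L ih =>
    have hsplit : PySem.List.pyRange 1 (((L + 1 : Nat) : Int) + 1) 1
        = PySem.List.pyRange 1 ((L : Int) + 1) 1 ++ [(L : Int) + 1] := by
      push_cast
      rw [show ((L:Int) + 1 + 1) = ((L:Int) + 1) + 1 by ring]
      exact PySem.List.pyRange_one_succ_right (by omega)
    rw [hsplit, List.foldl_append, ih z o]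
    show pyAStep n _ ((L : Int) + 1) = _
    rw [pv_step, Finset.sum_range_succ, Finset.sum_range_succ]
    simp [add_assoc]

theorem pv_foldC (L : Nat) (z o : Int) :
    (PySem.List.pyRange 0 (L : Int) 1).foldl (fun l i => l.set 0 ((l.getD 0 0) - (2:Int) ^ i.toNat)) [z, o]
      = [z - ∑ i ∈ Finset.range L, (2:Int) ^ i, o] := by
  induction L generalizing z with
  | zero => rw [PySem.List.pyRange_one_eq_nil (by norm_num)]; simp
  | succ L ih =>
    have hsplit : PySem.List.pyRange 0 ((L + 1 : Nat) : Int) 1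
        = PySem.List.pyRange 0 (L : Int) 1 ++ [(L : Int)] := by
      push_cast
      exact PySem.List.pyRange_one_succ_right (by omega)
    rw [hsplit, List.foldl_append, ih z, Finset.sum_range_succ]
    simp [List.set, List.getD]
    ring

theorem pv_divmod (n : Int) (_hn : 0 ≤ n) (i : Nat) :
    PySem.Int.floordiv n ((2:Int) ^ (i+1)) = n / 2 ^ (i+1) ∧
    PySem.Int.floordiv n ((2:Int) ^ i) = 2 * (n / 2 ^ (i+1)) + (n % 2 ^ (i+1)) / 2 ^ i ∧
    PySem.Int.mod n ((2:Int) ^ i) = (n % 2 ^ (i+1)) % 2 ^ i := by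
  have hp : (0:Int) < 2 ^ i := by positivity
  have hq : (0:Int) < 2 ^ (i+1) := by positivity
  refine ⟨PySem.Int.floordiv_eq_ediv_of_pos hq, ?_, ?_⟩
  · rw [PySem.Int.floordiv_eq_ediv_of_pos hp]
    conv_lhs => rw [show n = n % 2 ^ (i+1) + 2 ^ (i+1) * (n / 2 ^ (i+1)) by rw [Int.emod_add_ediv]]
    rw [show (2:Int) ^ (i+1) * (n / 2 ^ (i+1)) = (2 * (n / 2 ^ (i+1))) * 2 ^ i by ring]
    rw [Int.add_mul_ediv_right _ _ (ne_of_gt hp)]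
    ring
  · rw [PySem.Int.mod_eq_emod_of_pos hp]
    conv_lhs => rw [show n = n % 2 ^ (i+1) + 2 ^ (i+1) * (n / 2 ^ (i+1)) by rw [Int.emod_add_ediv]]
    rw [show (2:Int) ^ (i+1) * (n / 2 ^ (i+1)) = 2 ^ i * (2 * (n / 2 ^ (i+1))) by ring,
      Int.add_mul_emod_self_left]

theorem pv_OA_eq_g (n : Int) (_hn : 0 ≤ n) (i : Nat) : pvOA n i = pvG n i := by
  have hp : (0:Int) < 2 ^ i := by positivity
  have hq : (0:Int) < 2 ^ (i+1) := by positivity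
  obtain ⟨d1, d2, d3⟩ := pv_divmod n _hn i
  set a := n / 2 ^ (i+1) with ha
  set r := n % 2 ^ (i+1) with hr
  have hr0 : 0 ≤ r := Int.emod_nonneg n (ne_of_gt hq)
  have hr1 : r < 2 ^ (i+1) := Int.emod_lt_of_pos n hq
  have hq2 : (2:Int) ^ (i+1) = 2 * 2 ^ i := by ring
  have hmod2 : ∀ x : Int, PySem.Int.mod x 2 = x % 2 := fun x => PySem.Int.mod_eq_emod_of_pos (by norm_num)
  -- (n+1) / 2^(i+1) and (n+1) % 2^(i+1)
  have hn1 : n + 1 = r + 1 + 2 ^ (i+1) * a := by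
    have hx := Int.emod_add_ediv n (2 ^ (i+1)); rw [← ha, ← hr] at hx; omega
  have hfd : PySem.Int.floordiv (n+1) ((2:Int) ^ (i+1)) = (n+1) / 2 ^ (i+1) :=
    PySem.Int.floordiv_eq_ediv_of_pos hq
  have hmd : PySem.Int.mod (n+1) ((2:Int) ^ (i+1)) = (n+1) % 2 ^ (i+1) :=
    PySem.Int.mod_eq_emod_of_pos hq
  unfold pvOA pvG
  rw [d1, d2, d3, hfd, hmd, hmod2]
  by_cases hcase : r < 2 ^ i
  · -- low half: bit is 0
    have e1 : r / 2 ^ i = 0 := Int.ediv_eq_zero_of_lt hr0 hcase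
    have e2 : r % 2 ^ i = r := Int.emod_eq_of_lt hr0 hcase
    have e3 : (2 * a + r / 2 ^ i) % 2 = 0 := by rw [e1]; omega
    have e4 : (n + 1) / 2 ^ (i+1) = a := by
      rw [hn1, Int.add_mul_ediv_left _ _ (ne_of_gt hq), Int.ediv_eq_zero_of_lt (by omega) (by omega)]
      · ring
    have e5 : (n + 1) % 2 ^ (i+1) = r + 1 := by
      rw [hn1, Int.add_mul_emod_self_left, Int.emod_eq_of_lt (by omega) (by omega)]
    rw [e3, e4, e5]
    simp only [if_neg (by omega : ¬ (0:Int) = 1)]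
    rw [max_eq_left (by omega)]
    ring
  · -- high half: bit is 1
    have e1 : r / 2 ^ i = 1 := by
      conv_lhs => rw [show r = (r - 2 ^ i) + 1 * 2 ^ i by ring]
      rw [Int.add_mul_ediv_right _ _ (ne_of_gt hp), Int.ediv_eq_zero_of_lt (by omega) (by omega)]
      norm_num
    have e2 : r % 2 ^ i = r - 2 ^ i := by
      conv_lhs => rw [show r = (r - 2 ^ i) + 2 ^ i * 1 by ring]
      rw [Int.add_mul_emod_self_left, Int.emod_eq_of_lt (by omega) (by omega)]
    have e3 : (2 * a + r / 2 ^ i) % 2 = 1 := by rw [e1]; omega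
    rw [e3, e2]
    by_cases hc2 : r + 1 < 2 ^ (i+1)
    · have e4 : (n + 1) / 2 ^ (i+1) = a := by
        rw [hn1, Int.add_mul_ediv_left _ _ (ne_of_gt hq), Int.ediv_eq_zero_of_lt (by omega) (by omega)]
        · ring
      have e5 : (n + 1) % 2 ^ (i+1) = r + 1 := by
        rw [hn1, Int.add_mul_emod_self_left, Int.emod_eq_of_lt (by omega) (by omega)]
      rw [e4, e5, max_eq_right (by omega)]
      simp only [if_true]
      ring
    · have hr2 : r + 1 = 2 ^ (i+1) := by omega
      have e4 : (n + 1) / 2 ^ (i+1) = a + 1 := by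
        rw [hn1, hr2, show (2:Int) ^ (i+1) + 2 ^ (i+1) * a = 0 + (a + 1) * 2 ^ (i+1) by ring,
          Int.add_mul_ediv_right _ _ (ne_of_gt hq)]
        simp
      have e5 : (n + 1) % 2 ^ (i+1) = 0 := by
        rw [hn1, hr2, show (2:Int) ^ (i+1) + 2 ^ (i+1) * a = 0 + 2 ^ (i+1) * (a + 1) by ring,
          Int.add_mul_emod_self_left]
        simp
      rw [e4, e5, max_eq_left (by omega)]
      have : r = 2 * 2 ^ i - 1 := by omega
      rw [this]
      simp only [if_true]
      ring

theorem pv_ZA_add_OA (n : Int) (hn : 0 ≤ n) (i : Nat) : pvZA n i + pvOA n i = n + 1 := by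
  have hp : (0:Int) < 2 ^ i := by positivity
  have hq : (0:Int) < 2 ^ (i+1) := by positivity
  obtain ⟨d1, d2, d3⟩ := pv_divmod n hn i
  set a := n / 2 ^ (i+1) with ha
  set r := n % 2 ^ (i+1) with hr
  have hr0 : 0 ≤ r := Int.emod_nonneg n (ne_of_gt hq)
  have hr1 : r < 2 ^ (i+1) := Int.emod_lt_of_pos n hq
  have hneq : n = r + 2 ^ (i+1) * a := by
    have hx := Int.emod_add_ediv n (2 ^ (i+1)); rw [← ha, ← hr] at hx; omega
  have hmod2 : ∀ x : Int, PySem.Int.mod x 2 = x % 2 := fun x => PySem.Int.mod_eq_emod_of_pos (by norm_num)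
  unfold pvZA pvOA
  rw [d1, d2, d3, hmod2]
  by_cases hcase : r < 2 ^ i
  · have e1 : r / 2 ^ i = 0 := Int.ediv_eq_zero_of_lt hr0 hcase
    have e2 : r % 2 ^ i = r := Int.emod_eq_of_lt hr0 hcase
    have e3 : (2 * a + r / 2 ^ i) % 2 = 0 := by rw [e1]; omega
    rw [e3, e2]
    simp only [if_neg (by omega : ¬ (0:Int) = 1)]
    rw [hneq]; ring
  · have e1 : r / 2 ^ i = 1 := by
      conv_lhs => rw [show r = (r - 2 ^ i) + 1 * 2 ^ i by ring]
      rw [Int.add_mul_ediv_right _ _ (ne_of_gt hp), Int.ediv_eq_zero_of_lt (by omega) (by omega)]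
      norm_num
    have e2 : r % 2 ^ i = r - 2 ^ i := by
      conv_lhs => rw [show r = (r - 2 ^ i) + 2 ^ i * 1 by ring]
      rw [Int.add_mul_emod_self_left, Int.emod_eq_of_lt (by omega) (by omega)]
    have e3 : (2 * a + r / 2 ^ i) % 2 = 1 := by rw [e1]; omega
    rw [e3, e2, hneq]
    split_ifs with hh
    · ring
    · exact absurd rfl hh

theorem pv_altOnes (n : Int) (L : Nat) (hlow : ∀ k, k < L → (2:Int) ^ k ≤ n) (hup : n < 2 ^ L) :
    ∀ t j, L ≤ j + t → altOnes n ((2:Int) ^ j) = ∑ i ∈ Finset.Ico j L, pvG n i := by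
  intro t
  induction t with
  | zero =>
    intro j hj
    rw [altOnes, dif_neg, Finset.Ico_eq_empty (by omega), Finset.sum_empty]
    rintro ⟨-, h2⟩
    have : (2:Int) ^ L ≤ 2 ^ j := pow_le_pow_right₀ (by norm_num) (by omega)
    linarith
  | succ t ih =>
    intro j hj
    by_cases hjL : j < L
    · rw [altOnes, dif_pos ⟨one_le_pow₀ (by norm_num), hlow j hjL⟩,
        show (2:Int) * 2 ^ j = 2 ^ (j + 1) by ring, ih (j + 1) (by omega),
        Finset.sum_eq_sum_Ico_succ_bot hjL]
      unfold pvG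
      rw [show (2:Int) ^ (j + 1) = 2 * 2 ^ j by ring]
    · rw [altOnes, dif_neg, Finset.Ico_eq_empty (by omega), Finset.sum_empty]
      rintro ⟨-, h2⟩
      have : (2:Int) ^ L ≤ 2 ^ j := pow_le_pow_right₀ (by norm_num) (by omega)
      linarith

theorem pv_altTotal (n : Int) (L : Nat) (hlow : ∀ k, k < L → (2:Int) ^ k ≤ n) (hup : n < 2 ^ L) :
    ∀ t j, j < L → L ≤ j + t → altTotal n ((2:Int) ^ j) (j : Int)
      = (L : Int) * (n + 1) - (j : Int) * 2 ^ j - 2 ^ L + 2 ^ j := by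
  intro t
  induction t with
  | zero => intro j h1 h2; omega
  | succ t ih =>
    intro j hjL hle
    rw [altTotal, dif_pos ⟨one_le_pow₀ (by norm_num), hlow j hjL⟩]
    by_cases hj1 : j + 1 < L
    · have hmin : min n (2 * 2 ^ j - 1) = 2 * 2 ^ j - 1 := by
        have : (2:Int) ^ (j + 1) ≤ n := hlow (j + 1) hj1
        rw [min_eq_right]
        · rw [show (2:Int) ^ (j + 1) = 2 * 2 ^ j by ring] at this; omega
      have hrec := ih (j + 1) hj1 (by omega)
      rw [hmin, show (2:Int) * 2 ^ j = 2 ^ (j + 1) by ring,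
        show ((j:Int) + 1) = ((j + 1 : Nat) : Int) by push_cast; ring, hrec]
      push_cast
      ring
    · have hL : L = j + 1 := by omega
      have hn2 : n < 2 * 2 ^ j := by
        rw [hL, show (2:Int) ^ (j + 1) = 2 * 2 ^ j by ring] at hup; omega
      have hmin : min n (2 * 2 ^ j - 1) = n := min_eq_left (by omega)
      rw [hmin, altTotal, dif_neg (by rintro ⟨-, hx⟩; omega)]
      subst hL
      push_cast
      ring

theorem pv_geom (L : Nat) : ∑ i ∈ Finset.range L, (2:Int) ^ i = 2 ^ L - 1 := by
  induction L with
  | zero => simp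
  | succ L ih => rw [Finset.sum_range_succ, ih]; ring

theorem pv_main (end_ : Int) (h : 0 ≤ end_) : number_frequency end_ = number_frequency_alt end_ := by
  by_cases h0 : end_ = 0
  · subst h0; rfl
  · have hn1 : 1 ≤ end_ := by omega
    have hnt : (end_.toNat : Int) = end_ := Int.toNat_of_nonneg h
    set Lg := Nat.log 2 end_.toNat with hLg
    have hlow' : (2:Int) ^ Lg ≤ end_ := by
      have h1 := Nat.pow_log_le_self 2 (x := end_.toNat) (by omega)
      calc ((2:Int) ^ Lg) = ((2 ^ Lg : Nat) : Int) := by push_cast; ring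
        _ ≤ (end_.toNat : Int) := by exact_mod_cast h1
        _ = end_ := hnt
    have hup : end_ < 2 ^ (Lg + 1) := by
      have h2 := Nat.lt_pow_succ_log_self (by norm_num : 1 < 2) end_.toNat
      calc end_ = (end_.toNat : Int) := hnt.symm
        _ < ((2 ^ (Lg + 1) : Nat) : Int) := by exact_mod_cast h2
        _ = 2 ^ (Lg + 1) := by push_cast; ring
    have hlow : ∀ k, k < Lg + 1 → (2:Int) ^ k ≤ end_ := fun k hk =>
      le_trans (pow_le_pow_right₀ (by norm_num) (by omega)) hlow'
    have hones : altOnes end_ 1 = ∑ i ∈ Finset.range (Lg + 1), pvOA end_ i := by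
      rw [show (1:Int) = 2 ^ (0:Nat) by norm_num,
        pv_altOnes end_ (Lg + 1) hlow hup (Lg + 1) 0 (by omega), ← Finset.range_eq_Ico]
      exact (Finset.sum_congr rfl (fun i _ => (pv_OA_eq_g end_ h i))).symm
    have htot : altTotal end_ 1 0 = ((Lg + 1 : Nat) : Int) * (end_ + 1) - 2 ^ (Lg + 1) + 1 := by
      have := pv_altTotal end_ (Lg + 1) hlow hup (Lg + 1) 0 (by omega) (by omega)
      rw [show ((2:Int) ^ (0:Nat)) = 1 by norm_num] at this
      rw [show ((0:Nat) : Int) = 0 by norm_num] at this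
      rw [this]; ring
    have hZsum : ∑ i ∈ Finset.range (Lg + 1), pvZA end_ i
        = ((Lg + 1 : Nat) : Int) * (end_ + 1) - ∑ i ∈ Finset.range (Lg + 1), pvOA end_ i := by
      have hsum : ∑ i ∈ Finset.range (Lg + 1), (pvZA end_ i + pvOA end_ i)
          = ((Lg + 1 : Nat) : Int) * (end_ + 1) := by
        rw [Finset.sum_congr rfl (fun i _ => pv_ZA_add_OA end_ h i), Finset.sum_const,
          Finset.card_range, nsmul_eq_mul]
      rw [Finset.sum_add_distrib] at hsum
      linarith
    -- evaluate A
    have hdig : ((Nat.log 2 end_.toNat : Int) + 1) = (((Lg + 1 : Nat)) : Int) := by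
      rw [← hLg]; push_cast; ring
    have hA : number_frequency end_
        = [(∑ i ∈ Finset.range (Lg + 1), pvZA end_ i) - (2 ^ (Lg + 1) - 1),
           ∑ i ∈ Finset.range (Lg + 1), pvOA end_ i] := by
      unfold number_frequency
      rw [if_neg h0]
      simp only [hdig]
      rw [pv_foldA, pv_foldC, pv_geom]
      norm_num
    have hB : number_frequency_alt end_
        = [altTotal end_ 1 0 - altOnes end_ 1, altOnes end_ 1] := by
      unfold number_frequency_alt
      rw [if_neg h0]
    rw [hA, hB, hones, htot, hZsum]
    congr 1
    ring

-- ===== VERDICT =====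
theorem number_frequency_spec : Claim_equal_number_frequency := by
  intro end_ _ hpre
  unfold Spec_number_frequency
  exact pv_main end_ hpre
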